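-- pv_equiv track=rewrite | github.com/SuhyeokRoh/Algorithm_baekjoon | 프로그래머스/unrated/135808. 과일 장수/과일 장수.py | solution
-- ===== SOURCE A (Python) =====
-- def solution(k, m, score):
--     score.sort(reverse=True)
--     lst = [[0] * m for _ in range(len(score)//m)]
--     idx = row = col = 0
--
--     while idx < len(score) and row < len(lst):
--         lst[row][col] = score[idx]
--         col, idx = col+1, idx+1
--         if col == m:
--             row, col = row+1, 0
--
--     answer = 0
--     for x in lst:
--         answer += min(x) * m
--     return answer
-- ===== SOURCE B (Python) =====
-- def solution(k, m, score):
--     # Simpler: after the descending in-place sort (same mutation as A), each box's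
--     # minimum is its last element; stride directly to it instead of building the table.
--     score.sort(reverse=True)
--     rows = len(score) // m
--     return m * sum(score[i * m + m - 1] for i in range(rows))
-- ===== Notes on version B (the rewrite author's own statement) =====
-- stated objective: simpler
-- what changed: Drops A's 2D-table construction (the while loop filling rows column by column) and the per-row min() scan; after the same descending in-place sort, B reads each box's minimum directly as the last element of its stride-m group and sums those in one strided pass.
import Mathlib
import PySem

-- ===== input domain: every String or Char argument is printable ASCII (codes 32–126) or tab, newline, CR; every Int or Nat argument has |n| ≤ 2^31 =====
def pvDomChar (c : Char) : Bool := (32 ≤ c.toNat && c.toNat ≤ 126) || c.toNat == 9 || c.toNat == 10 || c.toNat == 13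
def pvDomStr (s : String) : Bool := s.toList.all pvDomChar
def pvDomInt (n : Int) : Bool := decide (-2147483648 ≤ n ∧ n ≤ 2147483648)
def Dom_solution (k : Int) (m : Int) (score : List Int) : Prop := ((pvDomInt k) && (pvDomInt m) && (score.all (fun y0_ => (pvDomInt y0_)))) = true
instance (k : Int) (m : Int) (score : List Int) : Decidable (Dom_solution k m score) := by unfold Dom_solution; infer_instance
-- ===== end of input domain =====

-- B is simpler: after the same descending sort, it sums each box's minimum read directly
-- as the last element of its stride-m group, instead of building A's 2D table and scanning
-- each row with min().  Both A and B sort `score` in place in Python (identical mutation);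
-- the equivalence proved here is about the return value.

-- ===== PORT A =====
-- A's while loop: state (lst, idx, row, col); fuel = len(score) bounds the idx increments
def solutionLoop (s : List Int) (m : Int) : Nat → List (List Int) → Nat → Nat → Nat → List (List Int)
  | 0, lst, _, _, _ => lst
  | f+1, lst, idx, row, col =>
    if idx < s.length ∧ row < lst.length then
      let lst' := lst.set row ((lst.getD row []).set col (s.getD idx 0))
      if ((col : Int) + 1 = m) then solutionLoop s m f lst' (idx+1) (row+1) 0
      else solutionLoop s m f lst' (idx+1) row (col+1)
    else lst

def solution (k : Int) (m : Int) (score : List Int) : Int :=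
  let s := PySem.List.sorted score (fun x => x) true
  let lst0 : List (List Int) := (List.range (PySem.Int.floordiv (s.length : Int) m).toNat).map (fun _ => List.replicate m.toNat 0)
  let lst := solutionLoop s m s.length lst0 0 0 0
  lst.foldl (fun a x => a + ((PySem.List.min? x (fun y => y)).getD 0) * m) 0

-- ===== PORT B =====
def solution_alt (k : Int) (m : Int) (score : List Int) : Int :=
  let s := PySem.List.sorted score (fun x => x) true
  let rows := PySem.Int.floordiv (s.length : Int) m
  m * (PySem.List.pyRange 0 rows 1).foldl (fun a i => a + (PySem.List.pyGet? s (i * m + m - 1)).getD 0) 0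

-- ===== PRECONDITION & SPEC =====
-- Pre_ excludes exactly m = 0, where both A and B raise ZeroDivisionError at len(score)//m.
def Pre_solution (k : Int) (m : Int) (score : List Int) : Prop := m ≠ 0
instance (k : Int) (m : Int) (score : List Int) : Decidable (Pre_solution k m score) := by unfold Pre_solution; infer_instance
def pvWitness_solution : Int × Int × List Int := (4, 3, [1, 2, 3, 1, 2, 3, 1])

def Spec_solution (k : Int) (m : Int) (score : List Int) (out : Int) : Prop := out = solution_alt k m score
instance (k : Int) (m : Int) (score : List Int) (out : Int) : Decidable (Spec_solution k m score out) := by unfold Spec_solution; infer_instance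

-- ===== CLAIM (what is proved, stated in full; the proofs are below) =====
def Claim_equal_solution : Prop := ∀ (k : Int) (m : Int) (score : List Int), Dom_solution k m score → Pre_solution k m score → Spec_solution k m score (solution k m score)

-- ===== LEMMAS AND PROOFS =====

lemma set_last_eq {α : Type} (l : List α) (c : Nat) (x : α) (h : c + 1 = l.length) :
    l.set c x = l.take c ++ [x] := by
  induction l generalizing c with
  | nil => simp at h
  | cons a l ih =>
    cases c with
    | zero =>
      have : l = [] := by cases l <;> simp_all
      subst this; simp [List.set]
    | succ c => simp [List.set_cons_succ, ih c (by simpa using h)]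

lemma take_succ_set {α : Type} (l : List α) (c : Nat) (x : α) (h : c < l.length) :
    (l.set c x).take (c+1) = l.take c ++ [x] := by
  induction l generalizing c with
  | nil => simp at h
  | cons a l ih =>
    cases c with
    | zero => simp
    | succ c => simp [List.set_cons_succ, ih c (by simpa using h)]

lemma getD_set_self (lst : List (List Int)) (r : Nat) (a : List Int) (h : r < lst.length) :
    (lst.set r a).getD r [] = a := by
  simp [List.getD_eq_getElem?_getD, h]

lemma getD_set_ne (lst : List (List Int)) (r q : Nat) (a : List Int) (h : q ≠ r) :
    (lst.set r a).getD q [] = lst.getD q [] := by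
  simp [List.getD_eq_getElem?_getD, List.getElem?_set_ne (by omega : r ≠ q)]

-- filling one row: from column c with t = m - c cells left, the loop writes
-- s[idx..idx+t) into row r and moves to the start of row r+1
lemma loop_row (s : List Int) (m : Int) (hm : 0 < m) :
    ∀ (t f : Nat) (lst : List (List Int)) (r idx c : Nat),
    1 ≤ t → c + t = m.toNat → t ≤ f →
    r < lst.length → (lst.getD r []).length = m.toNat → idx + t ≤ s.length →
    solutionLoop s m f lst idx r c =
      solutionLoop s m (f - t)
        (lst.set r ((lst.getD r []).take c ++ (s.drop idx).take t)) (idx + t) (r + 1) 0 := by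
  intro t
  induction t with
  | zero => omega
  | succ t ih =>
    intro f lst r idx c _ hcm hf hr hrow hidx
    obtain ⟨f', rfl⟩ : ∃ f', f = f' + 1 := ⟨f - 1, by omega⟩
    have hidx' : idx < s.length := by omega
    have hM : (m.toNat : Int) = m := Int.toNat_of_nonneg (le_of_lt hm)
    rw [solutionLoop]
    simp only [if_pos (⟨hidx', hr⟩ : idx < s.length ∧ r < lst.length)]
    have hdrop_cons : s.drop idx = s.getD idx 0 :: s.drop (idx + 1) := by
      rw [List.drop_eq_getElem_cons hidx', List.getD_eq_getElem?_getD,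
        List.getElem?_eq_getElem hidx']
      simp
    by_cases ht0 : t = 0
    · -- last cell of the row
      subst ht0
      have hc : (c : Int) + 1 = m := by
        have : c + 1 = m.toNat := by omega
        rw [← hM]; exact_mod_cast this
      simp only [if_pos hc, ← List.getD_eq_getElem?_getD]
      have : (lst.getD r []).set c (s.getD idx 0)
          = (lst.getD r []).take c ++ (s.drop idx).take 1 := by
        rw [set_last_eq _ c _ (by omega), hdrop_cons]; simp
      rw [this]; norm_num
    · -- interior cell
      have hc : ¬ ((c : Int) + 1 = m) := by
        intro h
        have : (c : Int) + 1 < (m.toNat : Int) := by exact_mod_cast (by omega : c + 1 < m.toNat)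
        omega
      simp only [if_neg hc, ← List.getD_eq_getElem?_getD]
      rw [ih f' (lst.set r ((lst.getD r []).set c (s.getD idx 0))) r (idx+1) (c+1)
        (by omega) (by omega) (by omega) (by simpa using hr)
        (by rw [getD_set_self _ _ _ hr]; simpa using hrow) (by omega)]
      congr 1
      · omega
      · rw [List.set_set, getD_set_self _ _ _ hr,
          take_succ_set _ _ _ (by omega), hdrop_cons]
        simp
      · omega

-- the whole loop: starting at a row boundary with rl full rows left, the final table
-- is the untouched prefix followed by the stride-m chunks of s starting at idx
lemma loop_rows (s : List Int) (m : Int) (hm : 0 < m) :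
    ∀ (rl : Nat) (lst : List (List Int)) (r idx : Nat),
    lst.length = r + rl →
    (∀ j, j < rl → (lst.getD (r + j) []).length = m.toNat) →
    idx + rl * m.toNat ≤ s.length →
    solutionLoop s m (s.length - idx) lst idx r 0 =
      lst.take r ++ (List.range rl).map (fun j => (s.drop (idx + j * m.toNat)).take m.toNat) := by
  intro rl
  induction rl with
  | zero =>
    intro lst r idx hlen _ _
    have hr : ¬ (idx < s.length ∧ r < lst.length) := by omega
    have : lst.take r = lst := List.take_of_length_le (by omega)
    cases h : s.length - idx with
    | zero => simp [solutionLoop, this]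
    | succ f => simp [solutionLoop, if_neg hr, this]
  | succ rl ih =>
    intro lst r idx hlen hrows hidx
    have hM1 : 1 ≤ m.toNat := by omega
    have hrlt : r < lst.length := by omega
    have hrow0 : (lst.getD r []).length = m.toNat := by simpa using hrows 0 (by omega)
    have hidxM : idx + m.toNat ≤ s.length := by nlinarith
    have hfuel : m.toNat ≤ s.length - idx := by omega
    rw [loop_row s m hm m.toNat (s.length - idx) lst r idx 0 hM1 (by omega) hfuel hrlt hrow0 hidxM]
    have hfuel2 : s.length - idx - m.toNat = s.length - (idx + m.toNat) := by omega
    rw [hfuel2, List.take_zero, List.nil_append]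
    rw [ih (lst.set r ((s.drop idx).take m.toNat)) (r+1) (idx + m.toNat)
      (by simpa using (by omega : lst.length = (r+1) + rl))
      (by
        intro j hj
        rw [show r + 1 + j = r + (j+1) by omega, getD_set_ne _ _ _ _ (by omega)]
        exact hrows (j+1) (by omega))
      (by nlinarith)]
    rw [take_succ_set _ _ _ hrlt]
    rw [List.range_succ_eq_map, List.map_cons, List.map_map]
    simp only [Nat.zero_mul, Nat.add_zero, List.append_assoc, List.singleton_append]
    congr 2
    apply List.map_congr_left
    intro j _
    simp only [Function.comp]
    congr 2
    simp only [Nat.succ_eq_add_one, Nat.mul_add, Nat.mul_one, Nat.mul_comm]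
    omega

-- min of a nonempty descending list is its last element
lemma min_desc (l : List Int) (h : l ≠ []) (hp : l.Pairwise (fun a b => b ≤ a)) :
    (PySem.List.min? l (fun y => y)).getD 0 = l.getLast h := by
  obtain ⟨v, hv⟩ : ∃ v, PySem.List.min? l (fun y => y) = some v := by
    cases hval : PySem.List.min? l (fun y => y) with
    | none => exact absurd ((PySem.List.min?_eq_none_iff l (fun y => y)).mp hval) h
    | some v => exact ⟨v, rfl⟩
  rw [hv]
  simp only [Option.getD_some]
  have hmem := PySem.List.min?_mem hv
  have hmin := PySem.List.min?_isMin hv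
  have hlast_mem := List.getLast_mem h
  have h1 : v ≤ l.getLast h := hmin _ hlast_mem
  have h2 : l.getLast h ≤ v := by
    obtain ⟨i, hi, rfl⟩ := List.getElem_of_mem hmem
    have : l.getLast h = l[l.length - 1] := List.getLast_eq_getElem h
    rw [this]
    have := List.pairwise_iff_getElem.mp hp
    rcases Nat.lt_or_ge i (l.length - 1) with hlt | hge
    · exact this i (l.length - 1) hi (by omega) hlt
    · have : i = l.length - 1 := by omega
      simp [this]
  omega

lemma foldl_add_eq_sum {α : Type} (l : List α) (f : α → Int) (a : Int) :
    l.foldl (fun acc x => acc + f x) a = a + (l.map f).sum := by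
  induction l generalizing a with
  | nil => simp
  | cons x xs ih => simp [List.foldl_cons, ih, add_assoc]

-- rows = len // m is nonpositive when m < 0 (len ≥ 0)
lemma floordiv_nonpos_of_neg (n : Nat) (m : Int) (hm : m < 0) :
    PySem.Int.floordiv (n : Int) m ≤ 0 := by
  have h := PySem.Int.floordiv_mul_add_mod (n : Int) m
  have hb := PySem.Int.mod_neg_bounds (n : Int) hm
  nlinarith [Int.natCast_nonneg n]

-- the last element of the j-th full chunk is s[j*M + M - 1]
lemma chunk_facts (s : List Int) (M j : Nat)
    (hM : 1 ≤ M) (hle : j * M + M ≤ s.length) :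
    ∃ h : (s.drop (j * M)).take M ≠ [],
      ((s.drop (j * M)).take M).getLast h = s.getD (j * M + M - 1) 0 := by
  have hlen : ((s.drop (j * M)).take M).length = M := by
    simp [List.length_take, List.length_drop]; omega
  have hne : (s.drop (j * M)).take M ≠ [] := by
    intro h; rw [h] at hlen; simp at hlen; omega
  refine ⟨hne, ?_⟩
  have hb : j * M + M - 1 < s.length := by omega
  rw [List.getLast_eq_getElem hne, List.getElem_eq_iff, hlen,
    List.getElem?_take, List.getElem?_drop,
    List.getD_eq_getElem?_getD, List.getElem?_eq_getElem hb]
  simp only [Option.getD_some]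
  rw [if_pos (by omega : M - 1 < M), show j * M + (M - 1) = j * M + M - 1 from by omega,
    List.getElem?_eq_getElem hb]

-- the main equality, on the (descending-sorted) list both bodies share
lemma main_eq (m : Int) (hm : m ≠ 0) (s : List Int) (hs : s.Pairwise (fun a b => b ≤ a)) :
    (solutionLoop s m s.length
        ((List.range (PySem.Int.floordiv (s.length : Int) m).toNat).map (fun _ => List.replicate m.toNat 0)) 0 0 0).foldl
      (fun a x => a + ((PySem.List.min? x (fun y => y)).getD 0) * m) 0 =
    m * (PySem.List.pyRange 0 (PySem.Int.floordiv (s.length : Int) m) 1).foldl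
      (fun a i => a + (PySem.List.pyGet? s (i * m + m - 1)).getD 0) 0 := by
  rcases lt_trichotomy m 0 with hneg | hz | hpos
  · -- m < 0 : no rows on either side
    have h0 : (PySem.Int.floordiv (s.length : Int) m).toNat = 0 := by
      have := floordiv_nonpos_of_neg s.length m hneg; omega
    rw [h0, PySem.List.pyRange_one_eq_nil (by
      have := floordiv_nonpos_of_neg s.length m hneg; omega)]
    have hloop : solutionLoop s m s.length ((List.range 0).map (fun _ => List.replicate m.toNat 0)) 0 0 0 = [] := by
      cases s with
      | nil => simp [solutionLoop]
      | cons a t => simp [solutionLoop]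
    rw [hloop]
    simp [List.foldl]
  · exact absurd hz hm
  · -- m > 0
    set M := m.toNat with hMdef
    have hM : (M : Int) = m := Int.toNat_of_nonneg (le_of_lt hpos)
    have hM1 : 1 ≤ M := by omega
    set n := s.length with hndef
    set R := n / M with hRdef
    have hfl : PySem.Int.floordiv (n : Int) m = (R : Int) := by
      rw [← hM]; exact_mod_cast PySem.Int.floordiv_natCast n M
    have hRM : R * M ≤ n := Nat.div_mul_le_self n M
    rw [hfl]
    have hloop :
        solutionLoop s m n ((List.range (R : Int).toNat).map (fun _ => List.replicate M 0)) 0 0 0 =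
          (List.range R).map (fun j => (s.drop (j * M)).take M) := by
      have := loop_rows s m hpos R ((List.range R).map (fun _ => List.replicate M 0)) 0 0
        (by simp)
        (by
          intro j hj
          rw [Nat.zero_add, List.getD_eq_getElem?_getD, List.getElem?_map,
            List.getElem?_range hj]
          simp [hMdef])
        (by simp only [Nat.zero_add]; exact hRM)
      simp only [Nat.sub_zero, Nat.zero_add, List.take_zero, List.nil_append] at this
      rw [Int.toNat_natCast]
      exact this
    rw [hloop, foldl_add_eq_sum, PySem.List.pyRange_one, foldl_add_eq_sum]
    simp only [List.map_map, Int.sub_zero, Int.toNat_natCast, zero_add]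
    have hmapA : (List.range R).map
          ((fun x => (PySem.List.min? x (fun y => y)).getD 0 * m) ∘ (fun j => (s.drop (j * M)).take M))
        = (List.range R).map (fun j => s.getD (j * M + M - 1) 0 * m) := by
      apply List.map_congr_left
      intro j hj
      have hj' : j < R := List.mem_range.mp hj
      have hle : j * M + M ≤ n := by
        calc j * M + M = (j + 1) * M := by ring
        _ ≤ R * M := Nat.mul_le_mul_right M (by omega)
        _ ≤ n := hRM
      obtain ⟨hne, hlast⟩ := chunk_facts s M j hM1 hle
      have hpair : ((s.drop (j * M)).take M).Pairwise (fun a b => b ≤ a) :=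
        hs.sublist ((List.take_sublist _ _).trans (List.drop_sublist _ _))
      simp only [Function.comp]
      rw [min_desc _ hne hpair, hlast]
    have hmapB : (List.range R).map
          ((fun i => (PySem.List.pyGet? s (i * m + m - 1)).getD 0) ∘ (fun k : Nat => (k : Int)))
        = (List.range R).map (fun j => s.getD (j * M + M - 1) 0) := by
      apply List.map_congr_left
      intro j hj
      have hj' : j < R := List.mem_range.mp hj
      have hle : j * M + M ≤ n := by
        calc j * M + M = (j + 1) * M := by ring
        _ ≤ R * M := Nat.mul_le_mul_right M (by omega)
        _ ≤ n := hRM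
      simp only [Function.comp]
      have hidx : ((j : Int)) * m + m - 1 = ((j * M + M - 1 : Nat) : Int) := by
        rw [← hM]; push_cast [Nat.cast_sub (by omega : 1 ≤ j * M + M)]; ring
      rw [hidx, PySem.List.pyGet?_natCast]
      rw [List.getD_eq_getElem?_getD]
    rw [hmapA, hmapB]
    rw [List.sum_map_mul_right]
    ring

-- ===== VERDICT (by name: the statement is the Claim_ definition above) =====
theorem solution_spec : Claim_equal_solution := by
  intro k m score _ hpre
  unfold Spec_solution solution solution_alt
  exact main_eq m hpre _ (PySem.List.sorted_pairwise_rev score (fun x => x))
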